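-- pv_equiv track=rewrite | github.com/sesiria/ML | NLP/Tokenizer/MaxMatchTokenizer.py | maxMatchTokenizerBW
-- ===== SOURCE A (Python) =====
-- def maxMatchTokenizerBW(sentence, vocab, maxlen = 5):
--     result = []
--
--     while len(sentence) > 0:
--         subseq = None
--
--         if len(sentence) < maxlen:
--             subseq = sentence
--         else:
--             subseq = sentence[-maxlen:]
--
--         while len(subseq) > 0:
--             if subseq in vocab or len(subseq) == 1:
--                 result.append(subseq)
--                 sentence = sentence[:-len(subseq)]
--                 break
--             else:
--                 subseq = subseq[1:]
--     result.reverse()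
--     return result
-- ===== SOURCE B (Python) =====
-- def maxMatchTokenizerBW(sentence, vocab, maxlen = 5):
--     words = set(vocab)
--     tokens = []
--     end = len(sentence)
--     while end > 0:
--         L = next((l for l in range(min(end, maxlen), 1, -1)
--                   if sentence[end - l:end] in words), 1)
--         tokens.append(sentence[end - L:end])
--         end -= L
--     tokens.reverse()
--     return tokens
-- ===== Notes on version B (the rewrite author's own statement) =====
-- stated objective: alternative
-- what changed: B precomputes a hash set of the vocab and walks an end index, picking the longest matching suffix length by a descending range scan with set lookups, instead of A's repeated string re-slicing with a list membership test at every candidate length; Pre_ excludes negative maxlen with a nonempty sentence, where A loops forever.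
-- intended difference: When maxlen == 0 (and some substring of length >= 2 of the sentence is in the vocab), A's slice sentence[-0:] accidentally yields the whole remaining sentence and A max-matches against it, returning multi-character tokens; B treats a window of size 0 as empty and emits single characters, which is the intended meaning of maxlen = 0. — e.g. on maxMatchTokenizerBW("ab", ["ab"], 0): A returns ["ab"], B returns ["a", "b"]
import Mathlib
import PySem

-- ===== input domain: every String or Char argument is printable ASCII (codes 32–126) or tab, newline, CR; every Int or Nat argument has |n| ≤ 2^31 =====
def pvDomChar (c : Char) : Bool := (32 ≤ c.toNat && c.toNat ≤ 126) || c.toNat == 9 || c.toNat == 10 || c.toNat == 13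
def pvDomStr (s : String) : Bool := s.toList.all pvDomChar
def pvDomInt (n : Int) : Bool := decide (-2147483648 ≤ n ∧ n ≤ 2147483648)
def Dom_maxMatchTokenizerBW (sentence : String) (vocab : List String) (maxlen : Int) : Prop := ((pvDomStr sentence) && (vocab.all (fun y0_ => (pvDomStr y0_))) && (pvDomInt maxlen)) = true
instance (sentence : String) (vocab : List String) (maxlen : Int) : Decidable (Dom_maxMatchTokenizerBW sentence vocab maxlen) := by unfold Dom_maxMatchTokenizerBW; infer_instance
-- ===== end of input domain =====

-- B replaces A's repeated slicing/vocab list scans with one hash set of the vocab and an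
-- index-based loop choosing the longest matching suffix length directly (objective: alternative).

-- ===== PORT A =====
-- inner 'while len(subseq) > 0' loop of A: drop the first char until a match (or length 1)
def pvInnerA (subseq : List Char) (vocabL : List (List Char)) : Option (List Char) :=
  match subseq with
  | [] => none
  | _ :: rest =>
      if subseq ∈ vocabL ∨ subseq.length = 1 then some subseq
      else pvInnerA rest vocabL

-- outer 'while len(sentence) > 0' loop of A (fuel = initial length; each iteration removes ≥ 1 char)
def pvLoopA (vocabL : List (List Char)) (maxlen : Int) : Nat → List Char → List (List Char) → List (List Char)
  | 0, _, acc => acc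
  | fuel + 1, s, acc =>
      if s.length = 0 then acc
      else
        let subseq := if (s.length : Int) < maxlen then s
                      else PySem.List.slice s (some (-maxlen)) none   -- sentence[-maxlen:]
        match pvInnerA subseq vocabL with
        | none => acc   -- unreachable when the window is nonempty (Pre_); Python loops forever here
        | some m =>
            pvLoopA vocabL maxlen fuel
              (PySem.List.slice s none (some (-(m.length : Int))))   -- sentence[:-len(subseq)]
              (acc ++ [m])

def maxMatchTokenizerBW (sentence : String) (vocab : List String) (maxlen : Int) : List String :=
  ((pvLoopA (vocab.map String.toList) maxlen sentence.toList.length sentence.toList []).reverse).map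
    (fun cs => String.ofList cs)

-- ===== PORT B =====
-- B's while loop over the end index; `words` is the precomputed set of the vocab
def pvLoopB (chars : List Char) (words : PySem.Set (List Char)) (maxlen : Int) :
    Nat → Nat → List (List Char) → List (List Char)
  | 0, _, acc => acc
  | fuel + 1, e, acc =>
      if e = 0 then acc
      else
        let L : Nat :=
          match (PySem.List.pyRange (min ((e : Nat) : Int) maxlen) 1 (-1)).find?
              (fun l => PySem.Set.contains words
                (PySem.List.slice chars (some ((e : Int) - l)) (some (e : Int)))) with
          | some l => l.toNat
          | none => 1
        pvLoopB chars words maxlen fuel (e - L)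
          (acc ++ [PySem.List.slice chars (some ((e : Int) - (L : Int))) (some (e : Int))])

def maxMatchTokenizerBW_alt (sentence : String) (vocab : List String) (maxlen : Int) : List String :=
  let words : PySem.Set (List Char) := PySem.Set.ofList (vocab.map String.toList)
  ((pvLoopB sentence.toList words maxlen sentence.toList.length sentence.toList.length []).reverse).map
    (fun cs => String.ofList cs)

-- ===== PRECONDITION & SPEC =====
-- Pre_ excludes negative maxlen with a nonempty sentence: there Python A loops forever
-- (the backward window eventually becomes empty and the inner while never runs), so A returns nothing.
def Pre_maxMatchTokenizerBW (sentence : String) (vocab : List String) (maxlen : Int) : Prop :=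
  sentence = "" ∨ 0 ≤ maxlen
instance (sentence : String) (vocab : List String) (maxlen : Int) : Decidable (Pre_maxMatchTokenizerBW sentence vocab maxlen) := by unfold Pre_maxMatchTokenizerBW; infer_instance

def pvWitness_maxMatchTokenizerBW : String × List String × Int := ("abcab", ["ab", "ca"], 5)

-- does the sentence contain a contiguous substring of length ≥ 2 that is in the vocab?
def pvHasMulti (chars : List Char) (vocabL : List (List Char)) : Bool :=
  (List.range (chars.length + 1)).any (fun e =>
    (List.range e).any (fun i =>
      decide (i + 2 ≤ e) && decide ((chars.take e).drop i ∈ vocabL)))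

-- When maxlen == 0 (and some substring of length ≥ 2 of the sentence is in the vocab), A's slice
-- sentence[-0:] accidentally yields the whole remaining sentence and A max-matches against it,
-- returning multi-character tokens; B treats a window of size 0 as empty and emits single
-- characters, which is the intended meaning of maxlen = 0.
def D_maxMatchTokenizerBW (sentence : String) (vocab : List String) (maxlen : Int) : Prop :=
  maxlen = 0 ∧ pvHasMulti sentence.toList (vocab.map String.toList) = true
instance (sentence : String) (vocab : List String) (maxlen : Int) : Decidable (D_maxMatchTokenizerBW sentence vocab maxlen) := by unfold D_maxMatchTokenizerBW; infer_instance

def Spec_maxMatchTokenizerBW (sentence : String) (vocab : List String) (maxlen : Int) (out : List String) : Prop := ¬ D_maxMatchTokenizerBW sentence vocab maxlen → out = maxMatchTokenizerBW_alt sentence vocab maxlen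
instance (sentence : String) (vocab : List String) (maxlen : Int) (out : List String) : Decidable (Spec_maxMatchTokenizerBW sentence vocab maxlen out) := by unfold Spec_maxMatchTokenizerBW; infer_instance

def pvDiffWitness_maxMatchTokenizerBW : String × List String × Int := ("ab", ["ab"], 0)
def pvDiffWitnessOut_maxMatchTokenizerBW : (List String) × (List String) := (["ab"], ["a", "b"])

-- ===== CLAIM (what is proved, stated in full; the proofs are below) =====
def Claim_unchanged_maxMatchTokenizerBW : Prop := ∀ (sentence : String) (vocab : List String) (maxlen : Int), Dom_maxMatchTokenizerBW sentence vocab maxlen → Pre_maxMatchTokenizerBW sentence vocab maxlen → Spec_maxMatchTokenizerBW sentence vocab maxlen (maxMatchTokenizerBW sentence vocab maxlen)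
def Claim_changed_maxMatchTokenizerBW : Prop := Dom_maxMatchTokenizerBW (pvDiffWitness_maxMatchTokenizerBW.1) (pvDiffWitness_maxMatchTokenizerBW.2.1) (pvDiffWitness_maxMatchTokenizerBW.2.2) ∧ Pre_maxMatchTokenizerBW (pvDiffWitness_maxMatchTokenizerBW.1) (pvDiffWitness_maxMatchTokenizerBW.2.1) (pvDiffWitness_maxMatchTokenizerBW.2.2) ∧ D_maxMatchTokenizerBW (pvDiffWitness_maxMatchTokenizerBW.1) (pvDiffWitness_maxMatchTokenizerBW.2.1) (pvDiffWitness_maxMatchTokenizerBW.2.2) ∧ maxMatchTokenizerBW (pvDiffWitness_maxMatchTokenizerBW.1) (pvDiffWitness_maxMatchTokenizerBW.2.1) (pvDiffWitness_maxMatchTokenizerBW.2.2) = pvDiffWitnessOut_maxMatchTokenizerBW.1 ∧ maxMatchTokenizerBW_alt (pvDiffWitness_maxMatchTokenizerBW.1) (pvDiffWitness_maxMatchTokenizerBW.2.1) (pvDiffWitness_maxMatchTokenizerBW.2.2) = pvDiffWitnessOut_maxMatchTokenizerBW.2 ∧ pvDiffWitnessOut_maxMatchTokenizerBW.1 ≠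 pvDiffWitnessOut_maxMatchTokenizerBW.2

def Claim_exact_maxMatchTokenizerBW : Prop := ∀ (sentence : String) (vocab : List String) (maxlen : Int), Dom_maxMatchTokenizerBW sentence vocab maxlen → Pre_maxMatchTokenizerBW sentence vocab maxlen → D_maxMatchTokenizerBW sentence vocab maxlen → maxMatchTokenizerBW sentence vocab maxlen ≠ maxMatchTokenizerBW_alt sentence vocab maxlen

-- ===== LEMMAS AND PROOFS =====

-- the length B selects at end-index e (cap already resolved to a Nat)
def pvSelLen (chars : List Char) (vocabL : List (List Char)) (e cap : Nat) : Nat :=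
  match List.find?
      (fun l => PySem.Set.contains (PySem.Set.ofList vocabL)
        (PySem.List.slice chars (some ((e : Int) - l)) (some (e : Int))))
      (PySem.List.pyRange ((cap : Nat) : Int) 1 (-1)) with
  | some l => l.toNat
  | none => 1

lemma pvSelLen_bounds (chars : List Char) (vocabL : List (List Char)) (e cap : Nat)
    (hcap : 1 ≤ cap) :
    1 ≤ pvSelLen chars vocabL e cap ∧ pvSelLen chars vocabL e cap ≤ cap := by
  unfold pvSelLen
  rcases hf : List.find?
      (fun l => PySem.Set.contains (PySem.Set.ofList vocabL)
        (PySem.List.slice chars (some ((e : Int) - l)) (some (e : Int))))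
      (PySem.List.pyRange ((cap : Nat) : Int) 1 (-1)) with _ | l
  · exact ⟨le_refl 1, hcap⟩
  · have hmem := List.mem_of_find?_eq_some hf
    rw [PySem.List.mem_pyRange_neg_one] at hmem
    change 1 ≤ l.toNat ∧ l.toNat ≤ cap
    omega

-- the slice B takes equals the corresponding suffix of chars.take e
lemma pvSlice_eq (chars : List Char) (e l : Nat) (hle : l ≤ e) :
    PySem.List.slice chars (some ((e : Int) - (l : Int))) (some (e : Int))
      = (chars.take e).drop (e - l) := by
  have h1 : ((e : Int) - (l : Int)) = ((e - l : Nat) : Int) := by omega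
  rw [h1, PySem.List.slice_natCast, List.drop_take]

-- B's search predicate holds iff the suffix of that length is in the vocab
lemma pvPred_iff (chars : List Char) (vocabL : List (List Char)) (e l : Nat) (hle : l ≤ e) :
    (PySem.Set.contains (PySem.Set.ofList vocabL)
        (PySem.List.slice chars (some ((e : Int) - (l : Int))) (some (e : Int))) = true)
      ↔ (chars.take e).drop (e - l) ∈ vocabL := by
  rw [pvSlice_eq chars e l hle]
  simp [PySem.Set.contains, PySem.Set.mem_ofList]

-- A's inner while loop = B's descending length search, on a window of length cap
lemma pvInner_eq (chars : List Char) (vocabL : List (List Char)) (e : Nat) (he : e ≤ chars.length) :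
    ∀ cap, 1 ≤ cap → cap ≤ e →
      pvInnerA ((chars.take e).drop (e - cap)) vocabL
        = some ((chars.take e).drop (e - pvSelLen chars vocabL e cap)) := by
  intro cap
  induction cap with
  | zero => omega
  | succ n ih =>
    intro _ hce
    have hlen_take : (chars.take e).length = e := by
      rw [List.length_take]; omega
    have hwl : ((chars.take e).drop (e - (n + 1))).length = n + 1 := by
      rw [List.length_drop, hlen_take]; omega
    rcases hw : (chars.take e).drop (e - (n + 1)) with _ | ⟨c, rest⟩
    · simp [hw] at hwl
    · have hrest : rest = (chars.take e).drop (e - n) := by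
        have h2 : ((chars.take e).drop (e - (n + 1))).drop 1 = (chars.take e).drop (e - n) := by
          rw [List.drop_drop]
          congr 1
          omega
        simpa [hw] using h2
      by_cases hn : n = 0
      · -- window length 1: find? searches the empty range, the len(subseq)==1 branch fires
        subst hn
        have hs : pvSelLen chars vocabL e 1 = 1 := by
          unfold pvSelLen
          rw [PySem.List.pyRange_neg_one_eq_nil (by norm_num)]
          rfl
        rw [hs, pvInnerA, if_pos (Or.inr (hw ▸ hwl)), hw]
      · by_cases hv : (chars.take e).drop (e - (n + 1)) ∈ vocabL
        · -- full window matches: find? hits the window length immediately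
          have hs : pvSelLen chars vocabL e (n + 1) = n + 1 := by
            unfold pvSelLen
            rw [PySem.List.pyRange_neg_one_cons (by push_cast; omega : (1:Int) < (((n+1:Nat) : Nat) : Int))]
            rw [List.find?_cons_of_pos (by
              exact (pvPred_iff chars vocabL e (n+1) (by omega)).mpr hv)]
            simp
          rw [hs, pvInnerA, if_pos (Or.inl (hw ▸ hv)), hw]
        · -- no match at this length: both sides step down to length n
          have hs : pvSelLen chars vocabL e (n + 1) = pvSelLen chars vocabL e n := by
            unfold pvSelLen
            rw [PySem.List.pyRange_neg_one_cons (by push_cast; omega : (1:Int) < (((n+1:Nat) : Nat) : Int))]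
            rw [List.find?_cons_of_neg (by
              simp only [Bool.not_eq_true]
              rw [← Bool.not_eq_true, pvPred_iff chars vocabL e (n+1) (by omega)]
              exact hv)]
            have h3 : (((n+1:Nat) : Nat) : Int) - 1 = (((n : Nat) : Nat) : Int) := by push_cast; ring
            rw [h3]
          rw [hs, pvInnerA]
          rw [if_neg (by
            push Not
            refine ⟨hw ▸ hv, ?_⟩
            have := hw ▸ hwl
            omega)]
          rw [hrest]
          exact ih (by omega) (by omega)

-- A's window equals chars.take e with the first (e - cap) chars dropped (positive maxlen)
lemma pvWindow_eq (chars : List Char) (maxlen : Int) (hml : 1 ≤ maxlen) (e : Nat)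
    (he : e ≤ chars.length) (hpos : 1 ≤ e) :
    (if ((chars.take e).length : Int) < maxlen then (chars.take e)
     else PySem.List.slice (chars.take e) (some (-maxlen)) none)
      = (chars.take e).drop (e - min e maxlen.toNat) := by
  obtain ⟨k, rfl⟩ : ∃ k : Nat, maxlen = (k : Int) := ⟨maxlen.toNat, by omega⟩
  have hlen_take : (chars.take e).length = e := by
    rw [List.length_take]; omega
  rw [hlen_take, Int.toNat_natCast]
  by_cases hlt : (e : Int) < (k : Int)
  · rw [if_pos hlt, show min e k = e by omega]
    simp
  · rw [if_neg hlt, show min e k = k by omega]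
    rw [PySem.List.slice_from_neg_natCast (chars.take e) k (by omega), hlen_take]

-- one common step of the two loops, once B's chosen length L is known
lemma pvStep_eq (chars : List Char) (vocabL : List (List Char)) (maxlen : Int)
    (fuel e : Nat) (acc : List (List Char)) (L : Nat) (hL1 : 1 ≤ L) (hLe : L ≤ e)
    (he : e ≤ chars.length)
    (ih : ∀ (e : Nat) (acc : List (List Char)), e ≤ chars.length →
      pvLoopA vocabL maxlen fuel (chars.take e) acc
        = pvLoopB chars (PySem.Set.ofList vocabL) maxlen fuel e acc) :
    pvLoopA vocabL maxlen fuel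
        (PySem.List.slice (chars.take e) none
          (some (-((((chars.take e).drop (e - L)).length : Nat) : Int))))
        (acc ++ [(chars.take e).drop (e - L)])
      = pvLoopB chars (PySem.Set.ofList vocabL) maxlen fuel (e - L)
        (acc ++ [PySem.List.slice chars (some ((e : Int) - (L : Int))) (some (e : Int))]) := by
  have hlen_take : (chars.take e).length = e := by
    rw [List.length_take]; omega
  have hlen_drop : ((chars.take e).drop (e - L)).length = L := by
    rw [List.length_drop, hlen_take]; omega
  rw [hlen_drop, pvSlice_eq chars e L hLe]
  rw [PySem.List.slice_to_neg_natCast (chars.take e) L (by omega), hlen_take,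
    List.take_take]
  rw [show min (e - L) e = e - L by omega]
  exact ih (e - L) _ (by omega)

-- main loop correspondence for positive maxlen
lemma pvLoop_eq (chars : List Char) (vocabL : List (List Char)) (maxlen : Int) (hml : 1 ≤ maxlen) :
    ∀ fuel e acc, e ≤ chars.length →
      pvLoopA vocabL maxlen fuel (chars.take e) acc
        = pvLoopB chars (PySem.Set.ofList vocabL) maxlen fuel e acc := by
  intro fuel
  induction fuel with
  | zero => intro e acc _; rfl
  | succ fuel ih =>
    intro e acc he
    have hlen_take : (chars.take e).length = e := by
      rw [List.length_take]; omega
    rw [pvLoopA, pvLoopB]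
    by_cases he0 : e = 0
    · rw [if_pos (by rw [hlen_take]; exact he0), if_pos he0]
    · rw [if_neg (by rw [hlen_take]; exact he0), if_neg he0]
      have hpos : 1 ≤ e := by omega
      set capN : Nat := min e maxlen.toNat with hcapN
      have hcap1 : 1 ≤ capN := by rw [hcapN]; omega
      have hcape : capN ≤ e := by rw [hcapN]; omega
      have hcapI : min ((e : Nat) : Int) maxlen = ((capN : Nat) : Int) := by
        rw [hcapN]; omega
      have hwin := pvWindow_eq chars maxlen hml e he hpos
      rw [← hcapN] at hwin
      have hinner := pvInner_eq chars vocabL e he capN hcap1 hcape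
      obtain ⟨hL1, hLcap⟩ := pvSelLen_bounds chars vocabL e capN hcap1
      simp only [hwin, hinner, hcapI]
      rcases hfind : List.find?
          (fun l => PySem.Set.contains (PySem.Set.ofList vocabL)
            (PySem.List.slice chars (some ((e : Int) - l)) (some (e : Int))))
          (PySem.List.pyRange ((capN : Nat) : Int) 1 (-1)) with _ | l
      · have hsel : pvSelLen chars vocabL e capN = 1 := by
          unfold pvSelLen; rw [hfind]
        rw [hsel] at hinner ⊢
        exact pvStep_eq chars vocabL maxlen fuel e acc 1 (le_refl 1) hpos he ih
      · have hsel : pvSelLen chars vocabL e capN = l.toNat := by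
          unfold pvSelLen; rw [hfind]
        rw [hsel] at hL1 hLcap ⊢
        exact pvStep_eq chars vocabL maxlen fuel e acc l.toNat hL1 (by omega) he ih

-- maxlen = 0, no multi-char vocab substring: A's inner loop on the whole window picks the last char
lemma pvInner_single (vocabL : List (List Char)) :
    ∀ (w : List Char), w ≠ [] → (∀ i, i + 2 ≤ w.length → w.drop i ∉ vocabL) →
      pvInnerA w vocabL = some (w.drop (w.length - 1)) := by
  intro w
  induction w with
  | nil => intro h; exact absurd rfl h
  | cons c rest ih =>
    intro _ hno
    rcases hr : rest with _ | ⟨d, rest'⟩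
    · simp [pvInnerA]
    · rw [← hr]
      have hrestne : rest ≠ [] := by rw [hr]; simp
      have hlen2 : 2 ≤ (c :: rest).length := by
        rw [hr]; simp only [List.length_cons]; omega
      rw [pvInnerA, if_neg (by
        push Not
        refine ⟨?_, by omega⟩
        have := hno 0 (by omega)
        simpa using this)]
      have hfin : (c :: rest).drop ((c :: rest).length - 1) = rest.drop (rest.length - 1) := by
        rw [hr]
        simp
      rw [hfin]
      exact ih hrestne (by
        intro i hi
        have := hno (i + 1) (by simp only [List.length_cons]; omega)
        simpa using this)

-- loop correspondence for maxlen = 0 when no substring of length ≥ 2 is in the vocab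
lemma pvLoop_eq_zero (chars : List Char) (vocabL : List (List Char))
    (hno : ∀ e, e ≤ chars.length → ∀ i, i + 2 ≤ e → (chars.take e).drop i ∉ vocabL) :
    ∀ fuel e acc, e ≤ chars.length →
      pvLoopA vocabL 0 fuel (chars.take e) acc
        = pvLoopB chars (PySem.Set.ofList vocabL) 0 fuel e acc := by
  intro fuel
  induction fuel with
  | zero => intro e acc _; rfl
  | succ fuel ih =>
    intro e acc he
    have hlen_take : (chars.take e).length = e := by
      rw [List.length_take]; omega
    rw [pvLoopA, pvLoopB]
    by_cases he0 : e = 0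
    · rw [if_pos (by rw [hlen_take]; exact he0), if_pos he0]
    · rw [if_neg (by rw [hlen_take]; exact he0), if_neg he0]
      have hpos : 1 ≤ e := by omega
      -- A's window: sentence[-0:] is the whole remaining sentence
      have hwin : (if ((chars.take e).length : Int) < 0 then (chars.take e)
          else PySem.List.slice (chars.take e) (some (-0)) none) = chars.take e := by
        rw [if_neg (by rw [hlen_take]; omega)]
        norm_num [PySem.List.slice_none_none]
      -- A's inner loop: no multi-char suffix matches, so it emits the last character
      have hinner : pvInnerA (chars.take e) vocabL
          = some ((chars.take e).drop (e - 1)) := by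
        rw [pvInner_single vocabL (chars.take e)
          (by intro h; rw [h] at hlen_take; simp at hlen_take; omega)
          (by intro i hi
              exact hno e he i (by omega)), hlen_take]
      -- B's candidate range is empty: min e 0 = 0, range(0, 1, -1) = []
      have hrange : PySem.List.pyRange (min ((e : Nat) : Int) 0) 1 (-1) = [] := by
        rw [show min ((e : Nat) : Int) 0 = 0 by omega]
        exact PySem.List.pyRange_neg_one_eq_nil (by norm_num)
      simp only [hwin, hinner, hrange, List.find?_nil]
      exact pvStep_eq chars vocabL 0 fuel e acc 1 (le_refl 1) hpos he ih

-- extract the pointwise no-multi-substring fact from ¬ pvHasMulti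
lemma pvHasMulti_false (chars : List Char) (vocabL : List (List Char))
    (h : ¬ pvHasMulti chars vocabL = true) :
    ∀ e, e ≤ chars.length → ∀ i, i + 2 ≤ e → (chars.take e).drop i ∉ vocabL := by
  intro e he i hi hmem
  apply h
  unfold pvHasMulti
  rw [List.any_eq_true]
  refine ⟨e, by rw [List.mem_range]; omega, ?_⟩
  rw [List.any_eq_true]
  exact ⟨i, by rw [List.mem_range]; omega, by simp [hi, hmem]⟩


-- there is a vocab substring of length ≥ 2 ending at some position ≤ e
def pvBadBelow (chars : List Char) (vocabL : List (List Char)) (e : Nat) : Prop :=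
  ∃ e' i, e' ≤ e ∧ i + 2 ≤ e' ∧ (chars.take e').drop i ∈ vocabL

lemma pvHasMulti_true (chars : List Char) (vocabL : List (List Char))
    (h : pvHasMulti chars vocabL = true) : pvBadBelow chars vocabL chars.length := by
  unfold pvHasMulti at h
  rw [List.any_eq_true] at h
  obtain ⟨e, he, h2⟩ := h
  rw [List.any_eq_true] at h2
  obtain ⟨i, _, h3⟩ := h2
  rw [List.mem_range] at he
  simp only [Bool.and_eq_true, decide_eq_true_eq] at h3
  exact ⟨e, i, by omega, h3.1, h3.2⟩

-- with maxlen = 0, B always emits single characters: exactly e tokens remain to add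
lemma pvLenB (chars : List Char) (words : PySem.Set (List Char)) :
    ∀ fuel e acc, e ≤ fuel →
      (pvLoopB chars words 0 fuel e acc).length = acc.length + e := by
  intro fuel
  induction fuel with
  | zero => intro e acc he; interval_cases e; rfl
  | succ fuel ih =>
    intro e acc he
    rw [pvLoopB]
    by_cases he0 : e = 0
    · rw [if_pos he0]; omega
    · rw [if_neg he0]
      have hrange : PySem.List.pyRange (min ((e : Nat) : Int) 0) 1 (-1) = [] := by
        rw [show min ((e : Nat) : Int) 0 = 0 by omega]
        exact PySem.List.pyRange_neg_one_eq_nil (by norm_num)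
      simp only [hrange, List.find?_nil]
      rw [ih (e - 1) _ (by omega)]
      simp only [List.length_append, List.length_cons, List.length_nil]
      omega

-- with maxlen = 0, A emits at most e tokens for the remaining e characters
lemma pvLenA_le (chars : List Char) (vocabL : List (List Char)) :
    ∀ fuel e acc, e ≤ chars.length →
      (pvLoopA vocabL 0 fuel (chars.take e) acc).length ≤ acc.length + e := by
  intro fuel
  induction fuel with
  | zero => intro e acc _; simp [pvLoopA]
  | succ fuel ih =>
    intro e acc he
    have hlen_take : (chars.take e).length = e := by
      rw [List.length_take]; omega
    rw [pvLoopA]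
    by_cases he0 : e = 0
    · rw [if_pos (by rw [hlen_take]; exact he0)]; omega
    · rw [if_neg (by rw [hlen_take]; exact he0)]
      have hwin : (if ((chars.take e).length : Int) < 0 then (chars.take e)
          else PySem.List.slice (chars.take e) (some (-0)) none) = chars.take e := by
        rw [if_neg (by rw [hlen_take]; omega)]
        norm_num [PySem.List.slice_none_none]
      have hinner := pvInner_eq chars vocabL e he e (by omega) (le_refl e)
      rw [show e - e = 0 by omega, List.drop_zero] at hinner
      obtain ⟨hs1, hse⟩ := pvSelLen_bounds chars vocabL e e (by omega)
      set L := pvSelLen chars vocabL e e with hL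
      have hlen_drop : ((chars.take e).drop (e - L)).length = L := by
        rw [List.length_drop, hlen_take]; omega
      simp only [hwin, hinner]
      rw [hlen_drop, PySem.List.slice_to_neg_natCast (chars.take e) L (by omega), hlen_take,
        List.take_take, show min (e - L) e = e - L by omega]
      have := ih (e - L) (acc ++ [(chars.take e).drop (e - L)]) (by omega)
      simp only [List.length_append, List.length_cons, List.length_nil] at this
      omega

-- with maxlen = 0 and a vocab substring of length ≥ 2 still in reach, A emits FEWER than e tokens
lemma pvLenA_lt (chars : List Char) (vocabL : List (List Char)) :
    ∀ fuel e acc, e ≤ chars.length → e ≤ fuel → pvBadBelow chars vocabL e →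
      (pvLoopA vocabL 0 fuel (chars.take e) acc).length < acc.length + e := by
  intro fuel
  induction fuel with
  | zero =>
    intro e acc _ hef hbad
    obtain ⟨e', i, h1, h2, _⟩ := hbad
    omega
  | succ fuel ih =>
    intro e acc he hef hbad
    have hpos : 1 ≤ e := by
      obtain ⟨e', i, h1, h2, _⟩ := hbad
      omega
    have hlen_take : (chars.take e).length = e := by
      rw [List.length_take]; omega
    rw [pvLoopA, if_neg (by rw [hlen_take]; omega)]
    have hwin : (if ((chars.take e).length : Int) < 0 then (chars.take e)
        else PySem.List.slice (chars.take e) (some (-0)) none) = chars.take e := by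
      rw [if_neg (by rw [hlen_take]; omega)]
      norm_num [PySem.List.slice_none_none]
    have hinner := pvInner_eq chars vocabL e he e hpos (le_refl e)
    rw [show e - e = 0 by omega, List.drop_zero] at hinner
    obtain ⟨hs1, hse⟩ := pvSelLen_bounds chars vocabL e e hpos
    set L := pvSelLen chars vocabL e e with hL
    have hlen_drop : ((chars.take e).drop (e - L)).length = L := by
      rw [List.length_drop, hlen_take]; omega
    simp only [hwin, hinner]
    rw [hlen_drop, PySem.List.slice_to_neg_natCast (chars.take e) L (by omega), hlen_take,
      List.take_take, show min (e - L) e = e - L by omega]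
    rcases hfind : List.find?
        (fun l => PySem.Set.contains (PySem.Set.ofList vocabL)
          (PySem.List.slice chars (some ((e : Int) - l)) (some (e : Int))))
        (PySem.List.pyRange ((e : Nat) : Int) 1 (-1)) with _ | l
    · -- no suffix of length ≥ 2 of chars.take e matches: A emits the last char, badness stays below
      have hsel1 : L = 1 := by rw [hL]; unfold pvSelLen; rw [hfind]
      have hnosuf : ∀ i, i + 2 ≤ e → (chars.take e).drop i ∉ vocabL := by
        intro i hi hmem
        have hlmem : ((e - i : Nat) : Int) ∈ PySem.List.pyRange ((e : Nat) : Int) 1 (-1) := by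
          rw [PySem.List.mem_pyRange_neg_one]; omega
        have := List.find?_eq_none.mp hfind _ hlmem
        rw [pvPred_iff chars vocabL e (e - i) (by omega)] at this
        rw [show e - (e - i) = i by omega] at this
        exact this hmem
      have hbad' : pvBadBelow chars vocabL (e - 1) := by
        obtain ⟨e', i, h1, h2, h3⟩ := hbad
        rcases Nat.lt_or_ge e' e with hlt | hge
        · exact ⟨e', i, by omega, h2, h3⟩
        · have he' : e' = e := by omega
          subst he'
          exact absurd h3 (hnosuf i h2)
      have := ih (e - L) (acc ++ [(chars.take e).drop (e - L)]) (by omega) (by omega)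
        (by rw [hsel1]; exact hbad')
      simp only [List.length_append, List.length_cons, List.length_nil] at this
      omega
    · -- a suffix of length ≥ 2 matched: A consumes ≥ 2 chars for one token
      have hmem := List.mem_of_find?_eq_some hfind
      rw [PySem.List.mem_pyRange_neg_one] at hmem
      have hsel : L = l.toNat := by rw [hL]; unfold pvSelLen; rw [hfind]
      have hL2 : 2 ≤ L := by omega
      have := pvLenA_le chars vocabL fuel (e - L) (acc ++ [(chars.take e).drop (e - L)]) (by omega)
      simp only [List.length_append, List.length_cons, List.length_nil] at this
      omega

-- ===== VERDICT (by name: the statements are the Claim_ definitions above) =====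
theorem maxMatchTokenizerBW_spec : Claim_unchanged_maxMatchTokenizerBW := by
  intro sentence vocab maxlen _ hpre hnd
  unfold maxMatchTokenizerBW maxMatchTokenizerBW_alt
  rcases hpre with hs | hml
  · subst hs
    rfl
  · rcases lt_or_ge maxlen 1 with hml0 | hml1
    · have h0 : maxlen = 0 := by omega
      subst h0
      have hnm : ¬ pvHasMulti sentence.toList (vocab.map String.toList) = true := by
        intro hm
        exact hnd ⟨rfl, hm⟩
      have h := pvLoop_eq_zero sentence.toList (vocab.map String.toList)
        (pvHasMulti_false _ _ hnm) sentence.toList.length sentence.toList.length [] (le_refl _)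
      rw [List.take_length] at h
      rw [h]
    · have h := pvLoop_eq sentence.toList (vocab.map String.toList) maxlen hml1
        sentence.toList.length sentence.toList.length [] (le_refl _)
      rw [List.take_length] at h
      rw [h]

theorem maxMatchTokenizerBW_changed : Claim_changed_maxMatchTokenizerBW := by
  unfold Claim_changed_maxMatchTokenizerBW; decide

theorem maxMatchTokenizerBW_tight : Claim_exact_maxMatchTokenizerBW := by
  intro sentence vocab maxlen _ _ hD heq
  obtain ⟨hm0, hmul⟩ := hD
  subst hm0
  have hbad := pvHasMulti_true sentence.toList (vocab.map String.toList) hmul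
  have hA := pvLenA_lt sentence.toList (vocab.map String.toList)
    sentence.toList.length sentence.toList.length [] (le_refl _) (le_refl _) hbad
  have hB := pvLenB sentence.toList (PySem.Set.ofList (vocab.map String.toList))
    sentence.toList.length sentence.toList.length [] (le_refl _)
  rw [List.take_length] at hA
  have hlen := congrArg List.length heq
  unfold maxMatchTokenizerBW maxMatchTokenizerBW_alt at hlen
  simp only [List.length_map, List.length_reverse] at hlen
  rw [hlen, hB] at hA
  simp at hA
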